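-- pv_equiv track=rewrite | github.com/23000003/cryptography | Final-Cryptography-1-FINAL/crypto_pipeline.py | determine_order
-- ===== SOURCE A (Python) =====
-- def determine_order(action: str, key: str) -> list[int]:
--     """
--     Determines the order of processing steps based on the action and key.
--     The order is based on the sum of the key's character values modulo the number of steps.
--     """
--     total_sum = sum(key.encode('utf-8'))
--     total_process = 3
--
--     order = []
--     for i in range(total_process):
--         order.append(total_sum % total_process)
--         total_sum += 1
--
--     if action == "decrypt":
--         order = order[::-1]
--
--     return order
-- ===== SOURCE B (Python) =====
-- def determine_order(action: str, key: str) -> list[int]: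
--     b = sum(key.encode('utf-8')) % 3
--     base = [0, 1, 2]
--     order = base[b:] + base[:b]
--     if action == "decrypt":
--         order = order[::-1]
--     return order
-- ===== Notes on version B (the rewrite author's own statement) =====
-- stated objective: simpler
-- what changed: Replaces the 3-step incremental modular loop with a closed-form rotation of the fixed list [0,1,2] by sum(key)%3, then the same decrypt reversal.
import Mathlib
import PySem

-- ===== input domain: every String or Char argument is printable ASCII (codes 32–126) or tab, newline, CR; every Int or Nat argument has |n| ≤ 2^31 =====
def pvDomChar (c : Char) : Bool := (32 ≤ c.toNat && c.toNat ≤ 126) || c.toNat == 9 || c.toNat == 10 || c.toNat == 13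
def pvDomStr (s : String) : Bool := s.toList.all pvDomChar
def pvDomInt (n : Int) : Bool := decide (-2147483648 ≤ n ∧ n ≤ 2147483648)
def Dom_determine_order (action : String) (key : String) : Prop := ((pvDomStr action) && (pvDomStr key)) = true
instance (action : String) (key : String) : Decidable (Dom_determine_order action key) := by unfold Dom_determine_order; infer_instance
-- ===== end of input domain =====

-- B rewrites A's 3-step modular loop as a closed-form rotation of [0,1,2]; objective: simpler.
-- key.encode('utf-8') byte sum is ported as the sum of code points — exact on the ASCII domain Dom.

-- ===== PORT A =====
def determine_order (action : String) (key : String) : List Int :=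
  let total_sum : Int := (key.toList.map (fun c => (c.toNat : Int))).sum
  -- for i in range(3): order.append(total_sum % 3); total_sum += 1
  let st := (PySem.List.pyRange 0 3 1).foldl
      (fun (st : List Int × Int) _ => (st.1 ++ [PySem.Int.mod st.2 3], st.2 + 1)) ([], total_sum)
  let order := st.1
  -- order[::-1] is reverse (PySem.List.slice?_none_none_neg_one)
  if action == "decrypt" then order.reverse else order

-- ===== PORT B =====
def determine_order_alt (action : String) (key : String) : List Int :=
  let b := PySem.Int.mod ((key.toList.map (fun c => (c.toNat : Int))).sum) 3
  let base : List Int := [0, 1, 2]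
  let order := PySem.List.slice base (some b) none ++ PySem.List.slice base none (some b)
  if action == "decrypt" then order.reverse else order

-- ===== PRECONDITION & SPEC =====
def Spec_determine_order (action : String) (key : String) (out : List Int) : Prop := out = determine_order_alt action key
instance (action : String) (key : String) (out : List Int) : Decidable (Spec_determine_order action key out) := by unfold Spec_determine_order; infer_instance

-- ===== CLAIM (what is proved, stated in full; the proofs are below) =====
def Claim_equal_determine_order : Prop := ∀ (action : String) (key : String), Dom_determine_order action key → Spec_determine_order action key (determine_order action key)

-- ===== LEMMAS AND PROOFS =====

-- the pre-reversal lists agree for every starting sum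
lemma pre_rev_eq (s : Int) :
    [PySem.Int.mod s 3, PySem.Int.mod (s + 1) 3, PySem.Int.mod (s + 1 + 1) 3] =
      PySem.List.slice [0, 1, 2] (some (PySem.Int.mod s 3)) none ++
        PySem.List.slice [0, 1, 2] (some 0) (some (PySem.Int.mod s 3)) := by
  have h3 : (0 : Int) < 3 := by norm_num
  simp only [PySem.Int.mod_eq_emod_of_pos h3]
  have h0 : 0 ≤ s % 3 := Int.emod_nonneg s (by norm_num)
  have hlt : s % 3 < 3 := Int.emod_lt_of_pos s h3
  have h1 : (s + 1) % 3 = (s % 3 + 1) % 3 := by omega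
  have h2 : (s + 1 + 1) % 3 = (s % 3 + 2) % 3 := by omega
  rw [h1, h2]
  interval_cases h : (s % 3) <;> decide

lemma slice_none_eq (b : Int) :
    PySem.List.slice ([0, 1, 2] : List Int) none (some b) =
      PySem.List.slice [0, 1, 2] (some 0) (some b) := by
  simp [PySem.List.slice]

lemma main_eq (action key : String) :
    determine_order action key = determine_order_alt action key := by
  unfold determine_order determine_order_alt
  have hr : PySem.List.pyRange 0 3 1 = [0, 1, 2] := by decide
  rw [hr]
  simp only [List.foldl_cons, List.foldl_nil, List.nil_append]
  rw [slice_none_eq, ← pre_rev_eq _]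
  simp

-- ===== VERDICT (by name: the statement is the Claim_ definition above) =====
theorem determine_order_spec : Claim_equal_determine_order := by
  intro action key _
  exact main_eq action key
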